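-- pv_equiv track=rewrite | github.com/dnjs2721/Algorithm_Python | Programmers/햄버거 만들기.py | solution
-- ===== SOURCE A (Python) =====
-- def solution(ingredient):
--     answer = 0
--     idx_check = 0
--
--     while idx_check <= len(ingredient)-2:
--         if ingredient[idx_check:idx_check+4] == [1,2,3,1]:
--             del (ingredient[idx_check:idx_check+4])
--             idx_check -= 3
--             answer += 1
--         idx_check += 1
--
--     return answer
-- ===== SOURCE B (Python) =====
-- def solution(ingredient):
--     answer = 0
--     stack = []
--     for x in ingredient:
--         if x == 1 and stack[-3:] == [1, 2, 3]:
--             del stack[-3:]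
--             answer += 1
--         else:
--             stack.append(x)
--     return answer
-- ===== Notes on version B (the rewrite author's own statement) =====
-- stated objective: faster
-- what changed: Replaced A's index-rewinding scan, which deletes every matched burger slice from the list and backs up the index (repeated del re-shifts the tail), by a single left-to-right pass pushing ingredients on a stack and popping-and-counting each time an ingredient completes the burger pattern on top of the stack.
import Mathlib
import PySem

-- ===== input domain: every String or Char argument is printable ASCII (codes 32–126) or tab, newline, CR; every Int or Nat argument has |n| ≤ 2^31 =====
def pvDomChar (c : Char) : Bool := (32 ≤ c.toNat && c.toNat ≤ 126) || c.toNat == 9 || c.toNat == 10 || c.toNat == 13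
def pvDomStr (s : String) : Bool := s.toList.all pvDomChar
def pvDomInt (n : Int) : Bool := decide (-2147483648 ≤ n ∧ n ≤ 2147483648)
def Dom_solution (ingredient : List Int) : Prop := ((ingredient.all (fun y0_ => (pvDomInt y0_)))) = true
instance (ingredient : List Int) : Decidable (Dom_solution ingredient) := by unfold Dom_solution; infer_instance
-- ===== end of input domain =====

-- B replaces A's quadratic scan-with-deletion (re-slicing and rebuilding the list after every
-- match) by a single O(n) stack pass; equivalence is about the RETURN value only (A mutates
-- its argument in place, B does not).

-- ===== PORT A =====
-- while idx_check <= len(ingredient)-2: if ingredient[idx:idx+4]==[1,2,3,1]: del …; idx-=3; answer+=1; idx+=1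
def solutionLoop (L : List Int) (i : Int) (ans : Int) : Int :=
  if _hg : i ≤ (L.length : Int) - 2 then
    if _hm : PySem.List.slice L (some i) (some (i + 4)) = [1, 2, 3, 1] then
      -- del ingredient[idx:idx+4]  ==  ingredient[:idx] ++ ingredient[idx+4:]
      solutionLoop (PySem.List.slice L none (some i) ++ PySem.List.slice L (some (i + 4)) none)
        (i - 3 + 1) (ans + 1)
    else
      solutionLoop L (i + 1) ans
  else ans
termination_by (2 * (L.length : Int) - i + 3).toNat
decreasing_by
  · have hA : (PySem.List.slice L none (some i)).length = PySem.List.clampIdx L.length i := by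
      rw [← PySem.List.slice_zero_start, PySem.List.length_slice]
      simp [PySem.List.clampIdx]
    have hB : (PySem.List.slice L (some (i + 4)) none).length
        = L.length - PySem.List.clampIdx L.length (i + 4) := by
      rw [PySem.List.slice_some_none]; simp
    have h4 : PySem.List.clampIdx L.length (i + 4) - PySem.List.clampIdx L.length i = 4 := by
      have h := congrArg List.length _hm
      rw [PySem.List.length_slice] at h
      simpa using h
    have h6 := PySem.List.clampIdx_le L.length (i + 4)
    rw [List.length_append, hA, hB]
    omega
  · omega

def solution (ingredient : List Int) : Int := solutionLoop ingredient 0 0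

-- ===== PORT B =====
-- single pass: push each ingredient on a stack; when x==1 arrives on top of [1,2,3], pop and count
def stepB (p : List Int × Int) (x : Int) : List Int × Int :=
  if x = 1 ∧ PySem.List.slice p.1 (some (-3)) none = [1, 2, 3] then
    (PySem.List.slice p.1 none (some (-3)), p.2 + 1)   -- del stack[-3:]; answer += 1
  else
    (p.1 ++ [x], p.2)                                  -- stack.append(x)

def solution_alt (ingredient : List Int) : Int :=
  (ingredient.foldl stepB ([], 0)).2

-- ===== PRECONDITION & SPEC =====
def Spec_solution (ingredient : List Int) (out : Int) : Prop := out = solution_alt ingredient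
instance (ingredient : List Int) (out : Int) : Decidable (Spec_solution ingredient out) := by unfold Spec_solution; infer_instance

-- ===== CLAIM (what is proved, stated in full; the proofs are below) =====
def Claim_equal_solution : Prop := ∀ (ingredient : List Int), Dom_solution ingredient → Spec_solution ingredient (solution ingredient)

-- ===== LEMMAS AND PROOFS =====

-- proof-side mirror of stepB with the stack reversed (most recent element at the HEAD)
def stepC (p : List Int × Int) (x : Int) : List Int × Int :=
  if x = 1 ∧ p.1.take 3 = [3, 2, 1] then (p.1.drop 3, p.2 + 1) else (x :: p.1, p.2)

theorem stepBC (st : List Int) (c x : Int) :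
    stepB (st, c) x = ((stepC (st.reverse, c) x).1.reverse, (stepC (st.reverse, c) x).2) := by
  have hslice : PySem.List.slice st (some (-3)) none = st.drop (st.length - 3) :=
    PySem.List.slice_from_neg_ofNat st 3 (by norm_num)
  have hcond : (x = 1 ∧ PySem.List.slice st (some (-3)) none = [1, 2, 3])
      ↔ (x = 1 ∧ st.reverse.take 3 = [3, 2, 1]) := by
    rw [hslice]
    constructor
    · rintro ⟨hx, hs⟩
      have hlen3 : 3 ≤ st.length := by
        have h := congrArg List.length hs; simp at h; omega
      refine ⟨hx, ?_⟩
      have h3 : st.length - (st.length - 3) = 3 := by omega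
      have := List.reverse_drop (l := st) (i := st.length - 3)
      rw [h3, hs] at this
      simp [← this]
    · rintro ⟨hx, hs⟩
      have hlen3 : 3 ≤ st.length := by
        have h := congrArg List.length hs; simp at h; omega
      refine ⟨hx, ?_⟩
      have h3 : st.length - (st.length - 3) = 3 := by omega
      have := List.reverse_drop (l := st) (i := st.length - 3)
      rw [h3, hs] at this
      have := congrArg List.reverse this
      simpa using this
  by_cases hc : x = 1 ∧ PySem.List.slice st (some (-3)) none = [1, 2, 3]
  · have hc' := hcond.mp hc
    obtain ⟨hx, hs⟩ := hc
    rw [hslice] at hs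
    have hlen3 : 3 ≤ st.length := by
      have h := congrArg List.length hs; simp at h; omega
    rw [stepB, stepC, if_pos (by rw [hslice]; exact ⟨hx, hs⟩), if_pos hc']
    rw [Prod.mk.injEq]
    refine ⟨?_, rfl⟩
    · rw [PySem.List.slice_to_neg_ofNat st 3 (by norm_num)]
      have := List.reverse_take (l := st) (i := st.length - 3)
      rw [show st.length - (st.length - 3) = 3 by omega] at this
      rw [← this, List.reverse_reverse]
  · rw [stepB, stepC, if_neg hc, if_neg (fun h => hc (hcond.mpr h))]
    simp

theorem foldBC (xs : List Int) (st : List Int) (c : Int) :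
    List.foldl stepB (st, c) xs
      = ((List.foldl stepC (st.reverse, c) xs).1.reverse, (List.foldl stepC (st.reverse, c) xs).2) := by
  induction xs generalizing st c with
  | nil => simp
  | cons x xs ih =>
      simp only [List.foldl_cons, stepBC]
      rw [ih]
      simp

theorem countShift (xs : List Int) (st : List Int) (c : Int) :
    List.foldl stepC (st, c) xs
      = ((List.foldl stepC (st, 0) xs).1, c + (List.foldl stepC (st, 0) xs).2) := by
  induction xs generalizing st c with
  | nil => simp
  | cons x xs ih =>
      simp only [List.foldl_cons, stepC]
      split_ifs with h
      · rw [ih _ (c + 1), ih _ (0 + 1)]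
        simp only [Prod.mk.injEq, true_and]
        ring
      · exact ih _ c

-- if the first 3 of the reversed taken prefix read [3,2,1], then positions n-3..n-1 read 1,2,3
theorem take3_rev (M : List Int) (n : Nat) (hn : n ≤ M.length)
    (h : (M.take n).reverse.take 3 = [3, 2, 1]) :
    3 ≤ n ∧ (M.drop (n - 3)).take 4 = 1 :: 2 :: 3 :: (M.drop n).take 1 := by
  have hlen : (M.take n).length = n := by simp [hn]
  have h3n : 3 ≤ n := by
    have hl := congrArg List.length h
    simp [hlen] at hl
    omega
  have hsplit : M.take n = M.take (n - 3) ++ (M.drop (n - 3)).take 3 := by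
    conv_lhs => rw [show n = (n - 3) + 3 by omega, List.take_add]
  have hlen3 : ((M.drop (n - 3)).take 3).length = 3 := by
    simp
    omega
  obtain ⟨x, y, z, hxyz⟩ := List.length_eq_three.mp hlen3
  have hrev : (M.take n).reverse.take 3 = [z, y, x] := by
    rw [hsplit, hxyz]; simp
  rw [hrev] at h
  simp only [List.cons.injEq, and_true] at h
  obtain ⟨hz, hy, hx⟩ := h
  refine ⟨h3n, ?_⟩
  have h41 : (M.drop (n - 3)).take 4 = (M.drop (n - 3)).take 3 ++ ((M.drop (n - 3)).drop 3).take 1 := by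
    rw [show (4 : Nat) = 3 + 1 from rfl, List.take_add]
  have hdd : (M.drop (n - 3)).drop 3 = M.drop n := by
    rw [List.drop_drop, show n - 3 + 3 = n by omega]
  rw [h41, hdd, hxyz, hx, hy, hz]
  simp

-- walking the scan pointer forward over a match-free segment neither pops nor counts
theorem foldC_seg (M : List Int) (a b : Nat) (c : Int) (hab : a ≤ b) (hb : b ≤ M.length)
    (hno : ∀ j : Nat, j + 3 < b → (M.drop j).take 4 ≠ [1, 2, 3, 1]) :
    List.foldl stepC ((M.take a).reverse, c) (M.drop a)
      = List.foldl stepC ((M.take b).reverse, c) (M.drop b) := by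
  induction b, hab using Nat.le_induction with
  | base => rfl
  | succ n hmn ih =>
      have hbn : n < M.length := by omega
      have step : stepC ((M.take n).reverse, c) M[n] = ((M.take (n + 1)).reverse, c) := by
        rw [stepC, if_neg ?_]
        · have ht : M.take (n + 1) = M.take n ++ [M[n]] := by
            rw [List.take_add_one]
            simp [List.getElem?_eq_getElem hbn]
          rw [ht, List.reverse_append]
          rfl
        · rintro ⟨hx1, htk⟩
          obtain ⟨h3n, h4⟩ := take3_rev M n (le_of_lt hbn) htk
          have h1 : (M.drop n).take 1 = [M[n]] := by
            rw [List.drop_eq_getElem_cons hbn]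
            rfl
          rw [h1, hx1] at h4
          exact hno (n - 3) (by omega) h4
      calc List.foldl stepC ((M.take a).reverse, c) (M.drop a)
          = List.foldl stepC ((M.take n).reverse, c) (M.drop n) :=
            ih (by omega) (fun j hj => hno j (by omega))
        _ = List.foldl stepC ((M.take (n + 1)).reverse, c) (M.drop (n + 1)) := by
            rw [List.drop_eq_getElem_cons hbn, List.foldl_cons, step]

theorem loop_eq (L : List Int) (i ans : Int) (hi : -2 ≤ i)
    (hInv : ∀ j : Nat, (j : Int) < i → (L.drop j).take 4 ≠ [1, 2, 3, 1]) :
    solutionLoop L i ans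
      = ans + (List.foldl stepC ((L.take i.toNat).reverse, 0) (L.drop i.toNat)).2 := by
  revert hi hInv
  induction L, i, ans using solutionLoop.induct with
  | case1 L i ans hg hm ih =>
      intro hi hInv
      -- the slice matched, so 0 ≤ i and i+4 ≤ len
      have hb4 : PySem.List.clampIdx L.length (i + 4) - PySem.List.clampIdx L.length i = 4 := by
        have h := congrArg List.length hm
        rw [PySem.List.length_slice] at h
        simpa using h
      have hbounds : 0 ≤ i ∧ i + 4 ≤ (L.length : Int) := by
        unfold PySem.List.clampIdx at hb4
        split_ifs at hb4 <;> omega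
      obtain ⟨hi0, hi4⟩ := hbounds
      have hin : i = (i.toNat : Int) := by omega
      generalize hn' : i.toNat = n at *
      have hlen : n + 4 ≤ L.length := by omega
      have h4 : (L.drop n).take 4 = [1, 2, 3, 1] := by
        rw [hin, show ((n : Int) + 4) = (n : Int) + ((4 : Nat) : Int) by norm_num,
          PySem.List.slice_natCast_add] at hm
        exact hm
      have hdrop : L.drop n = [1, 2, 3, 1] ++ L.drop (n + 4) := by
        conv_lhs => rw [← List.take_append_drop 4 (L.drop n)]
        rw [h4, List.drop_drop]
      have hPlen : (L.take n).length = n := by simp; omega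
      have hL' : PySem.List.slice L none (some i) ++ PySem.List.slice L (some (i + 4)) none
          = L.take n ++ L.drop (n + 4) := by
        rw [PySem.List.slice_to L (by omega), PySem.List.slice_from L (by omega)]
        rw [hn', show (i + 4).toNat = n + 4 by omega]
      have hLsplit : L = L.take n ++ ([1, 2, 3, 1] ++ L.drop (n + 4)) := by
        conv_lhs => rw [← List.take_append_drop n L, hdrop]
      have hInv' : ∀ j : Nat, (j : Int) < i - 3 + 1 →
          ((L.take n ++ L.drop (n + 4)).drop j).take 4 ≠ [1, 2, 3, 1] := by
        intro j hj hcontra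
        have hjn : j + 2 < n := by omega
        by_cases hcase : j + 4 ≤ n
        · have e1 : ((L.take n ++ L.drop (n + 4)).drop j).take 4 = ((L.take n).drop j).take 4 := by
            rw [List.drop_append_of_le_length (by omega), List.take_append_of_le_length (by simp; omega)]
          have e2 : ((L.take n).drop j).take 4 = (L.drop j).take 4 := by
            rw [List.drop_take, List.take_take, show min 4 (n - j) = 4 by omega]
          rw [e1, e2] at hcontra
          exact hInv j (by omega) hcontra
        · have hj3 : j = n - 3 := by omega
          have h3n : 3 ≤ n := by omega
          have hlen3 : ((L.take n).drop (n - 3)).length = 3 := by simp; omega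
          obtain ⟨x, y, z, hxyz⟩ := List.length_eq_three.mp hlen3
          have hfull : (L.drop (n - 3)).take 4 = [x, y, z, 1] := by
            conv_lhs => rw [hLsplit]
            rw [List.drop_append_of_le_length (by omega), hxyz, List.take_append]
            rfl
          have hne := hInv (n - 3) (by omega)
          rw [hfull] at hne
          have e3 : ((L.take n ++ L.drop (n + 4)).drop j).take 4
              = x :: y :: z :: (L.drop (n + 4)).take 1 := by
            rw [hj3, List.drop_append_of_le_length (by omega), hxyz, List.take_append]
            rfl
          rw [e3] at hcontra
          simp only [List.cons.injEq] at hcontra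
          obtain ⟨hx, hy, hz, -⟩ := hcontra
          exact hne (by rw [hx, hy, hz])
      rw [solutionLoop, dif_pos hg, dif_pos hm]
      rw [hL'] at ih ⊢
      rw [ih (by omega) hInv']
      -- now compare the two stack folds
      have hstep1 : stepC ((L.take n).reverse, 0) 1 = (1 :: (L.take n).reverse, 0) := by
        rw [stepC, if_neg ?_]
        rintro ⟨-, htk⟩
        obtain ⟨h3n, hfull⟩ := take3_rev L n (by omega) htk
        have h1 : (L.drop n).take 1 = [1] := by rw [hdrop]; rfl
        rw [h1] at hfull
        exact hInv (n - 3) (by omega) hfull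
      have hX : List.foldl stepC ((L.take n).reverse, 0) (L.drop n)
          = List.foldl stepC ((L.take n).reverse, 1) (L.drop (n + 4)) := by
        rw [hdrop]
        show List.foldl stepC _ (1 :: 2 :: 3 :: 1 :: L.drop (n + 4)) = _
        simp only [List.foldl_cons]
        rw [hstep1,
          show stepC (1 :: (L.take n).reverse, 0) 2 = (2 :: 1 :: (L.take n).reverse, 0) by
            rw [stepC, if_neg (by simp)],
          show stepC (2 :: 1 :: (L.take n).reverse, 0) 3 = (3 :: 2 :: 1 :: (L.take n).reverse, 0) by
            rw [stepC, if_neg (by simp)],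
          show stepC (3 :: 2 :: 1 :: (L.take n).reverse, 0) 1 = ((L.take n).reverse, 1) by
            rw [stepC, if_pos ⟨rfl, rfl⟩]; norm_num]
      have hm2 : (i - 3 + 1).toNat ≤ n := by omega
      have hseg := foldC_seg (L.take n ++ L.drop (n + 4)) (i - 3 + 1).toNat n 0 hm2
        (by simp; omega)
        (by
          intro j hj
          exact hInv' j (by omega))
      rw [List.take_left' hPlen, List.drop_left' hPlen] at hseg
      rw [hseg, hX, countShift (L.drop (n + 4)) ((L.take n).reverse) 1]
      simp
      omega
  | case2 L i ans hg hm ih =>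
      intro hi hInv
      rw [solutionLoop, dif_pos hg, dif_neg hm]
      by_cases hio : 0 ≤ i
      · have hInv' : ∀ j : Nat, (j : Int) < i + 1 → (L.drop j).take 4 ≠ [1, 2, 3, 1] := by
          intro j hj hc
          by_cases hji : (j : Int) < i
          · exact hInv j hji hc
          · have hji' : (j : Int) = i := by omega
            apply hm
            rw [show i = ((j : Nat) : Int) by omega,
              show (((j : Nat) : Int) + 4) = ((j : Nat) : Int) + ((4 : Nat) : Int) by norm_num,
              PySem.List.slice_natCast_add]
            exact hc
        rw [ih (by omega) hInv']
        have hn1 : (i + 1).toNat = i.toNat + 1 := by omega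
        have hseg := foldC_seg L i.toNat (i.toNat + 1) 0 (by omega)
          (by omega)
          (by
            intro j hj
            exact hInv j (by omega))
        rw [hn1, hseg]
      · have hInv' : ∀ j : Nat, (j : Int) < i + 1 → (L.drop j).take 4 ≠ [1, 2, 3, 1] := by
          intro j hj
          omega
        rw [ih (by omega) hInv', show (i + 1).toNat = i.toNat by omega]
  | case3 L i ans hg =>
      intro hi hInv
      rw [solutionLoop, dif_neg hg]
      by_cases hnl : L.length ≤ i.toNat
      · rw [List.drop_eq_nil_of_le hnl]
        simp
      · have hn : i.toNat = L.length - 1 := by omega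
        have hseg := foldC_seg L i.toNat L.length 0 (by omega) (le_refl _)
          (by
            intro j hj
            exact hInv j (by omega))
        rw [hseg, List.drop_eq_nil_of_le (le_refl _)]
        simp

-- ===== VERDICT (by name: the statement is the Claim_ definition above) =====
theorem solution_spec : Claim_equal_solution := by
  intro L _dom
  unfold Spec_solution solution solution_alt
  rw [loop_eq L 0 0 (by omega) (by intro j hj _; omega)]
  rw [show (([], (0:Int)) : List Int × Int) = (([] : List Int).reverse, (0:Int)) from rfl, foldBC]
  simp
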